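-- pv_equiv track=rewrite | github.com/nuclearkatie/trailmap | trailmap/pathway_analysis.py | get_shortest_and_longest_path
-- ===== SOURCE A (Python) =====
-- def get_shortest_and_longest_path(pathways):
--     '''finds the pathway with the shortest number of steps from source to
--     target. Returns a tuple with path and length.
--     '''
--     if len(pathways) is not 0:
--         shortest_length = min([len(path) for path in pathways])
--         shortest_path = min([path for path in pathways])
--         longest_length = max([len(path) for path in pathways])
--     else:
--         shortest_path = "No pathways found"
--         shortest_length = 0
--
--     return shortest_path, shortest_length, longest_length
-- ===== SOURCE B (Python) =====
-- def get_shortest_and_longest_path(pathways):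
--     '''finds the pathway with the shortest number of steps from source to
--     target. Returns a tuple with path and length.
--
--     Single explicit pass instead of three list-comprehension scans.
--     '''
--     best = pathways[0]
--     lo = hi = len(best)
--     for path in pathways[1:]:
--         n = len(path)
--         if n < lo:
--             lo = n
--         if n > hi:
--             hi = n
--         if path < best:
--             best = path
--     return best, lo, hi
-- ===== Notes on version B (the rewrite author's own statement) =====
-- stated objective: alternative
-- what changed: Three separate comprehension-based min/min/max scans (building intermediate lists) are replaced by one explicit single-pass loop maintaining the running min length, max length and lexicographic-min path.
import Mathlib
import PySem

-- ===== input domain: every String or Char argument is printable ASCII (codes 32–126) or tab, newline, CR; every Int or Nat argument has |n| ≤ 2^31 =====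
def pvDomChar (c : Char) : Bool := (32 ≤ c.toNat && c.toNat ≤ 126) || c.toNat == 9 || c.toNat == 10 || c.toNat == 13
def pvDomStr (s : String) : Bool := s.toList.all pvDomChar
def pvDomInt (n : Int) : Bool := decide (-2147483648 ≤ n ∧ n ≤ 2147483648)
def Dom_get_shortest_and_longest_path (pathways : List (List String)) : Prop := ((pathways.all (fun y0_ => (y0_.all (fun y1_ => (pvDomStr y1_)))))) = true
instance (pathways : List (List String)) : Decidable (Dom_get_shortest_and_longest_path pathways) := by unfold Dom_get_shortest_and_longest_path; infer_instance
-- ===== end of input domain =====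

-- B replaces A's three list-comprehension min/min/max scans by one explicit loop; equal cost, no temporaries.
-- Both Pythons raise on the empty list (A: UnboundLocalError, B: IndexError); Pre_ excludes it.

-- ===== PORT A =====
-- A: three comprehension scans; min/max with no key is PySem.List.min?/max? with identity key.
-- The .getD defaults never matter: under Pre_ (nonempty input) min?/max? are `some`.
def get_shortest_and_longest_path (pathways : List (List String)) : List String × Int × Int :=
  if pathways.length ≠ 0 then
    let shortest_length : Int :=
      (PySem.List.min? (pathways.map (fun path => (path.length : Int))) (fun x => x)).getD 0
    let shortest_path : List String :=
      (PySem.List.min? (pathways.map (fun path => path)) (fun x => x)).getD []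
    let longest_length : Int :=
      (PySem.List.max? (pathways.map (fun path => (path.length : Int))) (fun x => x)).getD 0
    (shortest_path, shortest_length, longest_length)
  else
    -- Python: longest_length is unbound here → UnboundLocalError at return (excluded by Pre_)
    ([], 0, 0)

-- ===== PORT B =====
-- B: single pass with running (best, lo, hi); pathways[1:] is the tail of the cons.
def get_shortest_and_longest_path_alt (pathways : List (List String)) : List String × Int × Int :=
  match pathways with
  | [] => ([], 0, 0)   -- Python B raises IndexError here (excluded by Pre_)
  | p0 :: rest =>
    rest.foldl (fun (acc : List String × Int × Int) path =>
        let n : Int := path.length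
        (if path < acc.1 then path else acc.1,
         if n < acc.2.1 then n else acc.2.1,
         if n > acc.2.2 then n else acc.2.2))
      (p0, (p0.length : Int), (p0.length : Int))

-- ===== PRECONDITION & SPEC =====
-- Pre_ excludes only the empty list, on which Python A raises UnboundLocalError (no value returned).
def Pre_get_shortest_and_longest_path (pathways : List (List String)) : Prop := pathways ≠ []
instance (pathways : List (List String)) : Decidable (Pre_get_shortest_and_longest_path pathways) := by unfold Pre_get_shortest_and_longest_path; infer_instance
def pvWitness_get_shortest_and_longest_path : List (List String) := [["a", "b"], ["c"]]
def Spec_get_shortest_and_longest_path (pathways : List (List String)) (out : List String × Int × Int) : Prop := out = get_shortest_and_longest_path_alt pathways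
instance (pathways : List (List String)) (out : List String × Int × Int) : Decidable (Spec_get_shortest_and_longest_path pathways out) := by unfold Spec_get_shortest_and_longest_path; infer_instance

-- ===== CLAIM (what is proved, stated in full; the proofs are below) =====
def Claim_equal_get_shortest_and_longest_path : Prop := ∀ (pathways : List (List String)), Dom_get_shortest_and_longest_path pathways → Pre_get_shortest_and_longest_path pathways → Spec_get_shortest_and_longest_path pathways (get_shortest_and_longest_path pathways)

-- ===== LEMMAS AND PROOFS =====

-- B's one-pass fold computes the three independent running extrema.
theorem alt_fold_eq (rest : List (List String)) (b : List String) (lo hi : Int) :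
    rest.foldl (fun (acc : List String × Int × Int) path =>
        let n : Int := path.length
        (if path < acc.1 then path else acc.1,
         if n < acc.2.1 then n else acc.2.1,
         if n > acc.2.2 then n else acc.2.2)) (b, lo, hi)
    = (rest.foldl min b,
       rest.foldl (fun a path => min a (path.length : Int)) lo,
       rest.foldl (fun a path => max a (path.length : Int)) hi) := by
  induction rest generalizing b lo hi with
  | nil => rfl
  | cons p t ih =>
    have h1 : (if p < b then p else b) = min b p := by
      by_cases hb : b ≤ p
      · simp [hb, not_lt.mpr hb]
      · simp [min_def, hb, not_le.mp hb]
    have h2 : (if (p.length : Int) < lo then (p.length : Int) else lo) = min lo (p.length : Int) := by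
      simp only [min_def]; split_ifs <;> omega
    have h3 : (if (p.length : Int) > hi then (p.length : Int) else hi) = max hi (p.length : Int) := by
      simp only [max_def]; split_ifs <;> omega
    simp only [List.foldl_cons, h1, h2, h3, ih]

-- min(list-of-lists) with the elaborator's Decidable instance; bridges to PySem.List.min?_id_cons.
theorem min?_strlist_id_cons (p0 : List String) (rest : List (List String)) :
    (@PySem.List.min? (List String) (List String) List.instLT (fun a b => a.decidableLT b)
      (p0 :: rest) (fun path => path)) = some (rest.foldl min p0) := by
  have h : (fun (a b : List String) => a.decidableLT b)
      = (LinearOrder.toDecidableLT : DecidableLT (List String)) :=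
    funext fun a => funext fun b => Subsingleton.elim _ _
  rw [h]
  exact PySem.List.min?_id_cons p0 rest

-- B's port on a nonempty list, in closed foldl form.
theorem alt_cons (p0 : List String) (rest : List (List String)) :
    get_shortest_and_longest_path_alt (p0 :: rest)
    = (rest.foldl min p0,
       rest.foldl (fun a path => min a (path.length : Int)) (p0.length : Int),
       rest.foldl (fun a path => max a (path.length : Int)) (p0.length : Int)) := by
  show rest.foldl _ _ = _
  exact alt_fold_eq rest p0 _ _

theorem get_shortest_and_longest_path_spec : Claim_equal_get_shortest_and_longest_path := by
  intro pathways _ hpre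
  unfold Spec_get_shortest_and_longest_path
  match pathways with
  | [] => exact absurd rfl hpre
  | p0 :: rest =>
    rw [alt_cons]
    unfold get_shortest_and_longest_path
    simp only [List.length_cons, List.map_cons, PySem.List.min?_id_cons,
      PySem.List.max?_id_cons, List.foldl_map, Option.getD_some]
    simp [min?_strlist_id_cons]

-- ===== VERDICT (by name: the statement is the Claim_ definition above) =====
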